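-- pv_equiv track=rewrite | github.com/bxthre3inc/irrig8 | Bxthre3/projects/agentic/agents/runner/agent_runner.py | extract_task_section
-- ===== SOURCE A (Python) =====
-- def extract_task_section(content):
--     # Find the task section — look for lines after ## headers that contain **Task:**
--     lines = content.split("\n")
--     for i, line in enumerate(lines):
--         if "**Task:**" in line:
--             return line.split("**Task:**", 1)[1].strip()
--         if "**Task:**" in line:
--             task_line = lines[i]
--             task = task_line.split("**Task:**", 1)[1].strip()
--             # Grab following lines that are continuation
--             j = i + 1
--             while j < len(lines) and (lines[j].startswith("**") or lines[j].strip() == "" or not lines[j].startswith("##")):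
--                 if lines[j].startswith("**") and ":**" in lines[j]:
--                     break
--                 task += " " + lines[j].strip()
--                 j += 1
--             return task.strip()
--     return None
-- ===== SOURCE B (Python) =====
-- def extract_task_section(content):
--     # Direct substring search instead of splitting into lines and scanning them.
--     marker = "**Task:**"
--     idx = content.find(marker)
--     if idx == -1:
--         return None
--     rest = content[idx + len(marker):]
--     return rest.split("\n", 1)[0].strip()
-- ===== Notes on version B (the rewrite author's own statement) =====
-- stated objective: simpler
-- what changed: Replaces the split-into-lines scan (with its unreachable duplicated branch and continuation loop) by a single substring find plus one slice and one split; B is three lines of straight-line code.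
import Mathlib
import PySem

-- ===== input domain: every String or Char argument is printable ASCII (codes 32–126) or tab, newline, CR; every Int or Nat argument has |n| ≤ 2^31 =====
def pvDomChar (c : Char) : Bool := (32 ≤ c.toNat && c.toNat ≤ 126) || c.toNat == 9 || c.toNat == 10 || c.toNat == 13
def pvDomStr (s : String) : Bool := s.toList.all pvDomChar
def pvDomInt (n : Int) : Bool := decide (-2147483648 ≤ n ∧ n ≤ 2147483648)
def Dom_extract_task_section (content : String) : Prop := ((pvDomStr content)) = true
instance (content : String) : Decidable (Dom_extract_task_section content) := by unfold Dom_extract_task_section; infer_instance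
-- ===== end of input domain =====

-- B replaces A's split-into-lines scan (with its unreachable duplicated branch) by one
-- substring find plus a slice and a single split: simpler straight-line code, same results.

-- ===== PORT A =====
-- the 'while' continuation loop of A's second branch (unreachable in Python, ported faithfully)
def extractTaskCont (lines : List String) (j : Int) (task : String) : String :=
  if h : j < (lines.length : Int) ∧
      (PySem.Str.startswith ((PySem.List.pyGet? lines j).getD "") "**" ||
       PySem.Str.strip ((PySem.List.pyGet? lines j).getD "") == "" ||
       !PySem.Str.startswith ((PySem.List.pyGet? lines j).getD "") "##") = true then
    if PySem.Str.startswith ((PySem.List.pyGet? lines j).getD "") "**" &&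
       PySem.Str.isIn ":**" ((PySem.List.pyGet? lines j).getD "") then
      task
    else
      extractTaskCont lines (j + 1)
        (task ++ " " ++ PySem.Str.strip ((PySem.List.pyGet? lines j).getD ""))
  else task
termination_by ((lines.length : Int) - j).toNat
decreasing_by omega

-- the 'for i, line in enumerate(lines)' loop
def extractTaskLoop (lines : List String) : List (Int × String) → Option String
  | [] => none
  | (i, line) :: rest =>
    if PySem.Str.isIn "**Task:**" line then
      some (PySem.Str.strip (((PySem.Str.splitMax? line "**Task:**" 1).getD []).getD 1 ""))
    else if PySem.Str.isIn "**Task:**" line then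
      -- second branch of A (dead in Python too: same condition as the first, which returned)
      some (PySem.Str.strip (extractTaskCont lines (i + 1)
        (PySem.Str.strip (((PySem.Str.splitMax? ((PySem.List.pyGet? lines i).getD "")
          "**Task:**" 1).getD []).getD 1 ""))))
    else extractTaskLoop lines rest

def extract_task_section (content : String) : Option String :=
  let lines := (PySem.Str.split? content "\n").getD []
  extractTaskLoop lines (PySem.List.enumerate lines)

-- ===== PORT B =====
def extract_task_section_alt (content : String) : Option String :=
  let idx := PySem.Str.find content "**Task:**"
  if idx == -1 then none
  else
    -- len("**Task:**") = 9
    let rest := PySem.Str.slice content (some (idx + 9)) none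
    some (PySem.Str.strip (((PySem.Str.splitMax? rest "\n" 1).getD []).getD 0 ""))

-- ===== PRECONDITION & SPEC =====
def Spec_extract_task_section (content : String) (out : Option String) : Prop := out = extract_task_section_alt content
instance (content : String) (out : Option String) : Decidable (Spec_extract_task_section content out) := by unfold Spec_extract_task_section; infer_instance

-- ===== CLAIM (what is proved, stated in full; the proofs are below) =====
def Claim_equal_extract_task_section : Prop := ∀ (content : String), Dom_extract_task_section content → Spec_extract_task_section content (extract_task_section content)

-- ===== LEMMAS AND PROOFS =====

-- the marker, as a char list
def pvM : List Char := ['*','*','T','a','s','k',':','*','*']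

-- first index at which sep occurs as a prefix (meaningful when sep occurs at all)
def pvIdx (sep : List Char) : List Char → Nat
  | [] => 0
  | c :: cs => if sep.isPrefixOf (c :: cs) then 0 else pvIdx sep cs + 1

-- structural model of split on a single newline
def pvSplitNl : List Char → List (List Char)
  | [] => [[]]
  | c :: cs => if c = '\n' then [] :: pvSplitNl cs else (pvSplitNl cs).modifyHead (c :: ·)

def pvUpTo (l : List Char) : List Char := l.takeWhile (· ≠ '\n')

-- model of A's line loop
def pvLoopA : List (List Char) → Option String
  | [] => none
  | L :: T =>
    if pvM <:+: L then some (String.ofList (PySem.Chars.strip (L.drop (pvIdx pvM L + 9))))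
    else pvLoopA T

-- model of B
def pvCoreB (cs : List Char) : Option String :=
  if pvM <:+: cs then some (String.ofList (PySem.Chars.strip (pvUpTo (cs.drop (pvIdx pvM cs + 9)))))
  else none

lemma pvSplitNl_head (l : List Char) : ∃ t, pvSplitNl l = pvUpTo l :: t := by
  induction l with
  | nil => exact ⟨[], rfl⟩
  | cons c cs ih =>
    obtain ⟨t, ht⟩ := ih
    by_cases hc : c = '\n'
    · exact ⟨pvSplitNl cs, by simp [pvSplitNl, pvUpTo, hc]⟩
    · refine ⟨t, ?_⟩
      simp [pvSplitNl, pvUpTo, hc, ht, List.takeWhile_cons]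

lemma modifyHead_id' (l : List (List Char)) :
    l.modifyHead (fun x => x) = l := by
  cases l <;> simp

-- splitOn.go for a single-char separator computes pvSplitNl
lemma goSplit_spec : ∀ (fuel : Nat) (l cur : List Char) (acc : List (List Char)),
    l.length ≤ fuel →
    PySem.Chars.splitOn.go ['\n'] fuel l cur acc
      = acc.reverse ++ (pvSplitNl l).modifyHead (cur.reverse ++ ·) := by
  intro fuel
  induction fuel with
  | zero =>
    intro l cur acc h
    have : l = [] := List.length_eq_zero_iff.mp (Nat.le_zero.mp h)
    subst this
    rw [PySem.Chars.splitOn.go]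
    simp [pvSplitNl]
  | succ fuel ih =>
    intro l cur acc h
    cases l with
    | nil =>
      rw [PySem.Chars.splitOn.go]
      · simp [pvSplitNl]
      · omega
    | cons c rest =>
      rw [PySem.Chars.splitOn.go]
      by_cases hc : c = '\n'
      · have hp : List.isPrefixOf ['\n'] (c :: rest) = true := by
          simp [List.isPrefixOf_iff_prefix, hc]
        simp only [hp, if_true]
        have hd : List.drop (['\n'] : List Char).length (c :: rest) = rest := rfl
        rw [hd, ih rest [] (cur.reverse :: acc) (by simpa using Nat.lt_succ_iff.mp (by simpa using h))]
        simp [pvSplitNl, hc, modifyHead_id']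
      · have hp : List.isPrefixOf ['\n'] (c :: rest) = false := by
          simp only [Bool.eq_false_iff, ne_eq, List.isPrefixOf_iff_prefix, List.cons_prefix_cons]
          intro hx
          exact hc hx.1.symm
        simp only [hp, Bool.false_eq_true, if_false]
        rw [ih rest (c :: cur) acc (by simpa using Nat.lt_succ_iff.mp (by simpa using h))]
        obtain ⟨t, ht⟩ := pvSplitNl_head rest
        simp [pvSplitNl, hc, ht]

lemma splitOn_nl (cs : List Char) : PySem.Chars.splitOn cs ['\n'] = pvSplitNl cs := by
  unfold PySem.Chars.splitOn
  rw [goSplit_spec (cs.length + 1) cs [] [] (by omega)]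
  simp [modifyHead_id']

-- splitOnMax.go with budget 0 keeps the remainder whole
lemma go0_spec (sep : List Char) (fuel : Nat) (l cur : List Char) (acc : List (List Char)) :
    PySem.Chars.splitOnMax.go sep fuel 0 l cur acc = acc.reverse ++ [cur.reverse ++ l] := by
  cases fuel with
  | zero => rw [PySem.Chars.splitOnMax.go]; simp
  | succ fuel =>
    cases l with
    | nil =>
      rw [PySem.Chars.splitOnMax.go]
      · simp
      · omega
    | cons c rest => rw [PySem.Chars.splitOnMax.go]; simp

-- splitOnMax.go with budget 1 splits at the first occurrence of sep, if any
lemma go1_spec (sep : List Char) (hsep : sep ≠ []) :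
    ∀ (fuel : Nat) (l cur : List Char) (acc : List (List Char)), l.length ≤ fuel →
    PySem.Chars.splitOnMax.go sep fuel 1 l cur acc
      = if sep <:+: l
        then acc.reverse ++ [cur.reverse ++ l.take (pvIdx sep l), l.drop (pvIdx sep l + sep.length)]
        else acc.reverse ++ [cur.reverse ++ l] := by
  intro fuel
  induction fuel with
  | zero =>
    intro l cur acc h
    have : l = [] := List.length_eq_zero_iff.mp (Nat.le_zero.mp h)
    subst this
    rw [PySem.Chars.splitOnMax.go]
    simp [List.infix_nil, hsep]
  | succ fuel ih =>
    intro l cur acc h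
    cases l with
    | nil =>
      rw [PySem.Chars.splitOnMax.go]
      · simp [List.infix_nil, hsep]
      · omega
    | cons c rest =>
      rw [PySem.Chars.splitOnMax.go]
      by_cases hp : sep <+: (c :: rest)
      · have hp' : sep.isPrefixOf (c :: rest) = true := List.isPrefixOf_iff_prefix.mpr hp
        have hin : sep <:+: (c :: rest) := hp.isInfix
        have hidx : pvIdx sep (c :: rest) = 0 := by simp [pvIdx, hp']
        rw [if_neg (by omega)]
        simp only [hp', if_true]
        rw [go0_spec, if_pos hin, hidx]
        simp
      · have hp' : sep.isPrefixOf (c :: rest) = false := by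
          simp only [Bool.eq_false_iff, ne_eq, List.isPrefixOf_iff_prefix]
          exact hp
        have hidx : pvIdx sep (c :: rest) = pvIdx sep rest + 1 := by simp [pvIdx, hp']
        have hin : (sep <:+: (c :: rest)) ↔ (sep <:+: rest) := by
          rw [List.infix_cons_iff]
          exact or_iff_right hp
        simp only [hp', Bool.false_eq_true, if_false]
        rw [if_neg (by omega)]
        rw [ih rest (c :: cur) acc (by simpa using Nat.lt_succ_iff.mp (by simpa using h))]
        by_cases hi : sep <:+: rest
        · rw [if_pos hi, if_pos (hin.mpr hi), hidx]
          have h1 : pvIdx sep rest + 1 + sep.length = (pvIdx sep rest + sep.length) + 1 := by omega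
          rw [h1, List.drop_succ_cons, List.take_succ_cons]
          simp
        · rw [if_neg hi, if_neg (fun hx => hi (hin.mp hx))]
          simp

lemma splitMax1_spec (l sep : List Char) (hsep : sep ≠ []) :
    PySem.Chars.splitMax? l sep 1
      = some (if sep <:+: l
              then [l.take (pvIdx sep l), l.drop (pvIdx sep l + sep.length)]
              else [l]) := by
  rw [PySem.Chars.splitMax?]
  rw [if_neg (by simp [hsep])]
  rw [PySem.Chars.splitOnMax, if_neg (by omega)]
  rw [(by norm_num : ((1 : Int)).toNat = 1)]
  rw [go1_spec sep hsep (l.length + 1) l [] [] (by omega)]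
  split <;> simp

-- pvIdx matches the specification of Chars.find
lemma pvIdx_spec (sep : List Char) : ∀ (l : List Char), sep <:+: l →
    sep <+: l.drop (pvIdx sep l) ∧ ∀ i < pvIdx sep l, ¬ sep <+: l.drop i := by
  intro l
  induction l with
  | nil =>
    intro h
    simp [List.infix_nil] at h
    simp [h, pvIdx]
  | cons c cs ih =>
    intro h
    by_cases hp : sep <+: (c :: cs)
    · have hp' : sep.isPrefixOf (c :: cs) = true := List.isPrefixOf_iff_prefix.mpr hp
      constructor
      · simpa [pvIdx, hp'] using hp
      · simp [pvIdx, hp']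
    · have hp' : sep.isPrefixOf (c :: cs) = false := by
        simp only [Bool.eq_false_iff, ne_eq, List.isPrefixOf_iff_prefix]
        exact hp
      have hcs : sep <:+: cs := (or_iff_right hp).mp (List.infix_cons_iff.mp h)
      obtain ⟨h1, h2⟩ := ih hcs
      have hidx : pvIdx sep (c :: cs) = pvIdx sep cs + 1 := by simp [pvIdx, hp']
      constructor
      · simpa [hidx, List.drop_succ_cons] using h1
      · intro i hi
        cases i with
        | zero => simpa using hp
        | succ i =>
          rw [List.drop_succ_cons]
          exact h2 i (by omega)

lemma find_eq_pvIdx (l sep : List Char) (h : sep <:+: l) :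
    PySem.Chars.find l sep = (pvIdx sep l : Int) := by
  have h0 : 0 ≤ PySem.Chars.find l sep := (PySem.Chars.find_nonneg_iff l sep).mpr h
  obtain ⟨f1, f2⟩ := PySem.Chars.find_spec h0
  obtain ⟨g1, g2⟩ := pvIdx_spec sep l h
  have : (PySem.Chars.find l sep).toNat = pvIdx sep l := by
    rcases Nat.lt_trichotomy (PySem.Chars.find l sep).toNat (pvIdx sep l) with hlt | heq | hgt
    · exact absurd f1 (g2 _ hlt)
    · exact heq
    · exact absurd g1 (f2 _ hgt)
  omega

lemma upTo_cons_ne (c : Char) (cs : List Char) (hc : ¬ c = '\n') :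
    pvUpTo (c :: cs) = c :: pvUpTo cs := by
  simp [pvUpTo, List.takeWhile_cons, hc]

lemma upTo_cons_nl (cs : List Char) : pvUpTo ('\n' :: cs) = [] := by
  simp [pvUpTo, List.takeWhile_cons]

-- pvIdx of a list the separator starts is 0
lemma pvIdx_of_prefix (sep l : List Char) (hsep : sep ≠ []) (h : sep <+: l) :
    pvIdx sep l = 0 := by
  cases l with
  | nil =>
    exact absurd (List.prefix_nil.mp h) hsep
  | cons c cs =>
    simp [pvIdx, List.isPrefixOf_iff_prefix.mpr h]

-- the first piece of a max-1 split on newline is takeWhile (· ≠ '\n')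
lemma piece0_eq_upTo (l : List Char) :
    (if ['\n'] <:+: l then l.take (pvIdx ['\n'] l) else l) = pvUpTo l := by
  induction l with
  | nil => simp [List.infix_nil, pvUpTo]
  | cons c cs ih =>
    by_cases hc : c = '\n'
    · subst hc
      have hpre : ['\n'] <+: ('\n' :: cs) := ⟨cs, rfl⟩
      rw [if_pos hpre.isInfix, pvIdx_of_prefix ['\n'] _ (by simp) hpre]
      simp [upTo_cons_nl]
    · have hp : List.isPrefixOf ['\n'] (c :: cs) = false := by
        simp only [Bool.eq_false_iff, ne_eq, List.isPrefixOf_iff_prefix, List.cons_prefix_cons]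
        intro hx
        exact hc hx.1.symm
      have hiff : (['\n'] <:+: (c :: cs)) ↔ (['\n'] <:+: cs) := by
        rw [List.infix_cons_iff]
        refine or_iff_right (fun hx => ?_)
        exact hc (List.cons_prefix_cons.mp hx).1.symm
      rw [upTo_cons_ne c cs hc]
      by_cases hi : ['\n'] <:+: cs
      · rw [if_pos (hiff.mpr hi)]
        rw [if_pos hi] at ih
        have hidx : pvIdx ['\n'] (c :: cs) = pvIdx ['\n'] cs + 1 := by simp [pvIdx, hp]
        rw [hidx, List.take_succ_cons, ih]
      · rw [if_neg (fun hx => hi (hiff.mp hx))]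
        rw [if_neg hi] at ih
        rw [← ih]

-- marker facts
lemma pvM_ne_nil : pvM ≠ [] := by decide

lemma pvM_toList : ("**Task:**" : String).toList = pvM := rfl

-- if pvM is a prefix of l, the first line of l starts with pvM and carries its remainder
lemma upTo_of_prefix (l : List Char) (h : pvM <+: l) :
    pvUpTo l = pvM ++ pvUpTo (l.drop 9) := by
  obtain ⟨r, hr⟩ := h
  subst hr
  have h9 : pvM.length = 9 := by decide
  rw [← h9, List.drop_left]
  unfold pvUpTo
  rw [List.takeWhile_append]
  rw [if_pos (by decide)]

-- B's port computes pvCoreB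
lemma portB_eq (content : String) : extract_task_section_alt content = pvCoreB content.toList := by
  simp only [extract_task_section_alt]
  by_cases h : pvM <:+: content.toList
  · have hf : PySem.Str.find content "**Task:**" = (pvIdx pvM content.toList : Int) := by
      rw [PySem.Str.find_eq, pvM_toList]
      exact find_eq_pvIdx _ _ h
    have hbeq : (((pvIdx pvM content.toList : Int)) == -1) = false :=
      beq_eq_false_iff_ne.mpr (by omega)
    rw [hf]
    simp only [hbeq, Bool.false_eq_true, if_false]
    rw [pvCoreB, if_pos h]
    refine congrArg some ?_
    apply String.toList_inj.mp
    rw [PySem.Str.toList_strip]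
    have hrest : (PySem.Str.slice content (some ((pvIdx pvM content.toList : Int) + 9)) none).toList
        = content.toList.drop (pvIdx pvM content.toList + 9) := by
      rw [PySem.Str.toList_slice, PySem.Chars.slice_eq_listSlice,
        PySem.List.slice_from _ (by omega),
        (by omega : ((pvIdx pvM content.toList : Int) + 9).toNat = pvIdx pvM content.toList + 9)]
    set rest := PySem.Str.slice content (some ((pvIdx pvM content.toList : Int) + 9)) none with hrdef
    have hsplit := PySem.Str.splitMax?_map rest "\n" 1
    have hnl : ("\n" : String).toList = ['\n'] := rfl
    rw [hnl, splitMax1_spec rest.toList ['\n'] (by simp)] at hsplit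
    obtain ⟨ss, hss, hmap⟩ := Option.map_eq_some_iff.mp hsplit
    rw [hss]
    simp only [Option.getD_some]
    have hpiece : (ss.getD 0 "").toList = pvUpTo rest.toList := by
      rw [← piece0_eq_upTo]
      by_cases hi : ['\n'] <:+: rest.toList
      · rw [if_pos hi] at hmap ⊢
        cases ss with
        | nil => simp at hmap
        | cons s0 st =>
          simp at hmap
          simp [hmap.1]
      · rw [if_neg hi] at hmap ⊢
        cases ss with
        | nil => simp at hmap
        | cons s0 st =>
          cases st with
          | nil =>
            simp at hmap
            simp [hmap]
          | cons a b => simp at hmap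
    rw [hpiece, hrest]
    simp
  · have hf : PySem.Str.find content "**Task:**" = -1 := by
      rw [PySem.Str.find_eq, pvM_toList]
      exact (PySem.Chars.find_eq_neg_one_iff _ _).mpr h
    rw [hf]
    simp only [BEq.rfl, if_true]
    rw [pvCoreB, if_neg h]

-- one step of A's line loop, bridged to pvLoopA (any index values)
lemma loop_bridge (lines : List String) :
    ∀ (pairs : List (Int × String)),
    extractTaskLoop lines pairs = pvLoopA (pairs.map (fun p => p.2.toList)) := by
  intro pairs
  induction pairs with
  | nil => rfl
  | cons p rest ih =>
    obtain ⟨i, line⟩ := p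
    by_cases h : pvM <:+: line.toList
    · have hb : PySem.Str.isIn "**Task:**" line = true := by
        rw [PySem.Str.isIn_eq, pvM_toList, PySem.Chars.isIn_iff_infix]
        exact h
      simp only [extractTaskLoop, hb, if_true]
      simp only [List.map_cons, pvLoopA]
      rw [if_pos h]
      refine congrArg some ?_
      apply String.toList_inj.mp
      rw [PySem.Str.toList_strip]
      have hsplit := PySem.Str.splitMax?_map line "**Task:**" 1
      rw [pvM_toList, splitMax1_spec line.toList pvM pvM_ne_nil, if_pos h] at hsplit
      obtain ⟨ss, hss, hmap⟩ := Option.map_eq_some_iff.mp hsplit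
      rw [hss]
      simp only [Option.getD_some]
      have h9 : pvM.length = 9 := by decide
      have hpiece : (ss.getD 1 "").toList = line.toList.drop (pvIdx pvM line.toList + 9) := by
        cases ss with
        | nil => simp at hmap
        | cons s0 st =>
          cases st with
          | nil => simp at hmap
          | cons s1 st' =>
            simp at hmap
            rw [← h9]
            simp [hmap.2.1]
      rw [hpiece]
      simp
    · have hb : PySem.Str.isIn "**Task:**" line = false := by
        simp only [Bool.eq_false_iff, ne_eq, PySem.Str.isIn_eq, pvM_toList,
          PySem.Chars.isIn_iff_infix]
        exact h
      simp only [extractTaskLoop, hb, Bool.false_eq_true, if_false]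
      rw [ih]
      simp only [List.map_cons, pvLoopA]
      rw [if_neg h]

lemma enumerate_map_snd (lines : List String) :
    ∀ (k : Int), (PySem.List.enumerate lines k).map (fun p => p.2.toList)
      = lines.map String.toList := by
  induction lines with
  | nil => intro k; rfl
  | cons s t ih =>
    intro k
    rw [PySem.List.enumerate]
    simp only [List.map_cons]
    rw [ih (k + 1)]

-- A's port computes pvLoopA over the newline split
lemma portA_eq (content : String) :
    extract_task_section content = pvLoopA (pvSplitNl content.toList) := by
  unfold extract_task_section
  have hsplit := PySem.Str.split?_map content "\n"
  have hnl : ("\n" : String).toList = ['\n'] := rfl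
  rw [hnl] at hsplit
  rw [PySem.Chars.split?] at hsplit
  rw [if_neg (by simp)] at hsplit
  rw [splitOn_nl] at hsplit
  obtain ⟨ls, hls, hmap⟩ := Option.map_eq_some_iff.mp hsplit
  rw [hls]
  simp only [Option.getD_some]
  rw [loop_bridge, enumerate_map_snd, hmap]

-- key: a first line that does not begin with the marker can absorb or drop its head char
lemma loopA_head_step (c : Char) (L : List Char) (t : List (List Char))
    (hnp : ¬ pvM <+: (c :: L)) :
    pvLoopA ((c :: L) :: t) = pvLoopA (L :: t) := by
  have hp' : pvM.isPrefixOf (c :: L) = false := by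
    simp only [Bool.eq_false_iff, ne_eq, List.isPrefixOf_iff_prefix]
    exact hnp
  have hiff : (pvM <:+: (c :: L)) ↔ (pvM <:+: L) := by
    rw [List.infix_cons_iff]
    exact or_iff_right hnp
  by_cases hi : pvM <:+: L
  · simp only [pvLoopA]
    rw [if_pos (hiff.mpr hi), if_pos hi]
    have hidx : pvIdx pvM (c :: L) = pvIdx pvM L + 1 := by simp [pvIdx, hp']
    have h1 : pvIdx pvM L + 1 + 9 = (pvIdx pvM L + 9) + 1 := by omega
    rw [hidx, h1, List.drop_succ_cons]
  · simp only [pvLoopA]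
    rw [if_neg (fun hx => hi (hiff.mp hx)), if_neg hi]

-- THE MAIN LEMMA: scanning the lines equals finding the marker globally
lemma main_lemma : ∀ (cs : List Char), pvLoopA (pvSplitNl cs) = pvCoreB cs := by
  intro cs
  induction cs with
  | nil =>
    simp [pvSplitNl, pvLoopA, pvCoreB, List.infix_nil, pvM_ne_nil]
  | cons c cs ih =>
    by_cases hp : pvM <+: (c :: cs)
    · -- the marker starts right here: c = '*', first line contains it at index 0
      have hc : c = '*' := by
        obtain ⟨r, hr⟩ := hp
        simp [pvM] at hr
        exact hr.1.symm
      have hcnl : ¬ c = '\n' := by rw [hc]; decide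
      obtain ⟨t, ht⟩ := pvSplitNl_head cs
      have hsplit : pvSplitNl (c :: cs) = pvUpTo (c :: cs) :: t := by
        simp only [pvSplitNl]
        rw [if_neg hcnl, ht, List.modifyHead_cons, ← upTo_cons_ne c cs hcnl]
      have hup : pvUpTo (c :: cs) = pvM ++ pvUpTo ((c :: cs).drop 9) :=
        upTo_of_prefix _ hp
      have hLp : pvM <+: pvUpTo (c :: cs) := ⟨_, hup.symm⟩
      have hidxL : pvIdx pvM (pvUpTo (c :: cs)) = 0 :=
        pvIdx_of_prefix _ _ pvM_ne_nil hLp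
      rw [hsplit]
      simp only [pvLoopA]
      rw [if_pos hLp.isInfix]
      have hidxC : pvIdx pvM (c :: cs) = 0 :=
        pvIdx_of_prefix _ _ pvM_ne_nil hp
      rw [pvCoreB, if_pos hp.isInfix, hidxC]
      rw [hidxL, hup]
      have h09 : (0 : Nat) + 9 = 9 := rfl
      rw [h09]
      have h9 : pvM.length = 9 := by decide
      rw [← h9, List.drop_left]
    · -- the marker does not start here: peel c on both sides
      have hp' : pvM.isPrefixOf (c :: cs) = false := by
        simp only [Bool.eq_false_iff, ne_eq, List.isPrefixOf_iff_prefix]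
        exact hp
      have hiff : (pvM <:+: (c :: cs)) ↔ (pvM <:+: cs) := by
        rw [List.infix_cons_iff]
        exact or_iff_right hp
      have hrhs : pvCoreB (c :: cs) = pvCoreB cs := by
        unfold pvCoreB
        by_cases hi : pvM <:+: cs
        · rw [if_pos (hiff.mpr hi), if_pos hi]
          have hidx : pvIdx pvM (c :: cs) = pvIdx pvM cs + 1 := by simp [pvIdx, hp']
          have h1 : pvIdx pvM cs + 1 + 9 = (pvIdx pvM cs + 9) + 1 := by omega
          rw [hidx, h1, List.drop_succ_cons]
        · rw [if_neg (fun hx => hi (hiff.mp hx)), if_neg hi]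
      rw [hrhs, ← ih]
      by_cases hc : c = '\n'
      · subst hc
        have hstep : pvSplitNl ('\n' :: cs) = [] :: pvSplitNl cs := by
          simp [pvSplitNl]
        rw [hstep]
        simp only [pvLoopA]
        rw [if_neg (by simp [List.infix_nil, pvM_ne_nil])]
      · obtain ⟨t, ht⟩ := pvSplitNl_head cs
        have hsplit : pvSplitNl (c :: cs) = (c :: pvUpTo cs) :: t := by
          simp only [pvSplitNl, if_neg hc, ht, List.modifyHead_cons]
        rw [hsplit, ht]
        apply loopA_head_step
        intro hx
        exact hp (hx.trans (List.cons_prefix_cons.mpr ⟨rfl, (List.takeWhile_prefix _)⟩))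

-- ===== VERDICT (by name: the statement is the Claim_ definition above) =====
theorem extract_task_section_spec : Claim_equal_extract_task_section := by
  intro content _
  unfold Spec_extract_task_section
  rw [portA_eq, portB_eq, main_lemma]
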